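-- pv_equiv track=rewrite | github.com/yesnoj/ScommettiamoChe | pronostici_app_calcioMagazine_pimp.py | find_next_giornata
-- ===== SOURCE A (Python) =====
-- def find_next_giornata(results_by_giornata, calendar_by_giornata):
--     """Find the next unplayed (or partially played) giornata.
--
--     Strategy:
--     1. If we have calendar data: find first giornata with more calendar entries than results
--     2. If calendar is empty: find first gap in results giornate, or last+1
--     """
--     if calendar_by_giornata:
--         all_giornate = sorted(set(list(results_by_giornata.keys()) + list(calendar_by_giornata.keys())))
--
--         for g in all_giornate:
--             cal_matches = calendar_by_giornata.get(g, [])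
--             res_matches = results_by_giornata.get(g, [])
--
--             if not cal_matches:
--                 continue
--
--             # If this giornata has fewer results than calendar entries, it's incomplete
--             if len(res_matches) < len(cal_matches):
--                 return g
--
--         # All complete — return next after last
--         if all_giornate:
--             return max(all_giornate) + 1
--
--     # Fallback: use only results data
--     if results_by_giornata:
--         played = sorted(results_by_giornata.keys())
--         # Serie B has 38 giornate, Serie C has 38 giornate
--         max_g = 38
--         for g in range(1, max_g + 1):
--             if g not in results_by_giornata or len(results_by_giornata[g]) == 0:
--                 return g
--         return played[-1] + 1 if played else 1
--
--     return 1
-- ===== SOURCE B (Python) =====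
-- def find_next_giornata(results_by_giornata, calendar_by_giornata):
--     """Find the next unplayed (or partially played) giornata.
--
--     Instead of sorting the key union and scanning it in order, walk the
--     calendar items once (an incomplete giornata must have a nonempty
--     calendar entry, so it is a calendar key) keeping a running minimum;
--     the max+1 fallback raises a running maximum over the results keys."""
--     if calendar_by_giornata:
--         best = None
--         for g, matches in calendar_by_giornata.items():
--             if matches and len(results_by_giornata.get(g, ())) < len(matches):
--                 if best is None or g < best:
--                     best = g
--         if best is not None:
--             return best
--         hi = max(calendar_by_giornata)
--         for g in results_by_giornata:
--             if g > hi: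
--                 hi = g
--         return hi + 1
--     if results_by_giornata:
--         covered = {g for g, v in results_by_giornata.items() if v}
--         for g in range(1, 39):
--             if g not in covered:
--                 return g
--         return max(results_by_giornata) + 1
--     return 1
-- ===== Notes on version B (the rewrite author's own statement) =====
-- stated objective: alternative
-- what changed: B never builds or sorts the key union: the calendar branch walks calendar.items() once keeping a running-minimum incomplete giornata (an incomplete giornata necessarily has a nonempty calendar entry), the max+1 fallback raises a running maximum over results keys starting from max(calendar), and the results-only branch tests range(1,39) against a precomputed set of giornate with nonempty results.
import Mathlib
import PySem

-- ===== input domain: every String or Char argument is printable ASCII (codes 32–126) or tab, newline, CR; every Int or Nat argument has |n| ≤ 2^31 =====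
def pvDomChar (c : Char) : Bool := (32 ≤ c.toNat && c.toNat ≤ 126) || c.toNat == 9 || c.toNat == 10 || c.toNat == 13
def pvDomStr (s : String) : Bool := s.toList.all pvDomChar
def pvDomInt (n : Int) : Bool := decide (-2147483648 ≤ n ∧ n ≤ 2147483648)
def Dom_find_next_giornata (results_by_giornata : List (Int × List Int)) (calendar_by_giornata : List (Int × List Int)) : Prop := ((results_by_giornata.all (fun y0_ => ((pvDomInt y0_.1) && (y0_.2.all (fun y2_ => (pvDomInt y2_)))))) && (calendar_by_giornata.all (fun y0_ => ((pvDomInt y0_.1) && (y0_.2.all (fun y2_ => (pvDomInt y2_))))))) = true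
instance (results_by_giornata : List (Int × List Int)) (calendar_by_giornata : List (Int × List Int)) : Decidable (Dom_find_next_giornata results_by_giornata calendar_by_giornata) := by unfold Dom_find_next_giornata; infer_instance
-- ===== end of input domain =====

-- B replaces A's sort-then-scan over the key union by one pass over the calendar items
-- with a running-minimum accumulator (and running-max / precomputed-set passes for the fallbacks).


-- ===== PORT A =====
-- the `for g in all_giornate` loop: continue on empty calendar entry, return g when incomplete
def pvLoopA (rd cd : PySem.Dict Int (List Int)) : List Int → Option Int
  | [] => none
  | g :: rest =>
      let cal_matches := cd.getD g []
      let res_matches := rd.getD g []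
      if cal_matches = [] then pvLoopA rd cd rest
      else if res_matches.length < cal_matches.length then some g
      else pvLoopA rd cd rest

-- the `for g in range(1, max_g + 1)` loop: `g not in results or len(results[g]) == 0`
def pvLoopRangeA (rd : PySem.Dict Int (List Int)) : List Int → Option Int
  | [] => none
  | g :: rest =>
      match rd.get? g with
      | none => some g
      | some l => if l.length = 0 then some g else pvLoopRangeA rd rest

-- the code from `if results_by_giornata:` down to the final `return 1`
def pvFallbackA (rd : PySem.Dict Int (List Int)) : Int :=
  if rd.size ≠ 0 then
    let played := PySem.List.sorted rd.keys (fun x => x)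
    match pvLoopRangeA rd (PySem.List.pyRange 1 (38 + 1)) with
    | some g => g
    | none =>
        -- `played[-1] + 1 if played else 1`
        match PySem.List.pyGet? played (-1) with
        | some x => x + 1
        | none => 1
  else 1

def find_next_giornata (results_by_giornata : List (Int × List Int)) (calendar_by_giornata : List (Int × List Int)) : Int :=
  let rd := PySem.Dict.ofList results_by_giornata
  let cd := PySem.Dict.ofList calendar_by_giornata
  if cd.size ≠ 0 then
    let all_giornate := PySem.List.sorted (PySem.Set.ofList (rd.keys ++ cd.keys)) (fun x => x)
    match pvLoopA rd cd all_giornate with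
    | some g => g
    | none =>
        -- `if all_giornate: return max(all_giornate) + 1`, else fall through
        match PySem.List.max? all_giornate (fun x => x) with
        | some m => m + 1
        | none => pvFallbackA rd
  else pvFallbackA rd

-- ===== PORT B =====
-- `for g, matches in calendar.items(): if matches and len(results.get(g,())) < len(matches): best = min`
def pvBestB (rd : PySem.Dict Int (List Int)) : List (Int × List Int) → Option Int → Option Int
  | [], best => best
  | (g, ms) :: rest, best =>
      if ms ≠ [] ∧ (rd.getD g []).length < ms.length then
        match best with
        | none => pvBestB rd rest (some g)
        | some b => if g < b then pvBestB rd rest (some g) else pvBestB rd rest (some b)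
      else pvBestB rd rest best

-- `for g in results_by_giornata: if g > hi: hi = g`
def pvHiB : List Int → Int → Int
  | [], hi => hi
  | g :: rest, hi => if g > hi then pvHiB rest g else pvHiB rest hi

def find_next_giornata_alt (results_by_giornata : List (Int × List Int)) (calendar_by_giornata : List (Int × List Int)) : Int :=
  let rd := PySem.Dict.ofList results_by_giornata
  let cd := PySem.Dict.ofList calendar_by_giornata
  if cd.size ≠ 0 then
    match pvBestB rd cd.items none with
    | some b => b                                               -- `if best is not None: return best`
    | none =>
        match PySem.List.max? cd.keys (fun x => x) with         -- `hi = max(calendar_by_giornata)`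
        | some h => pvHiB rd.keys h + 1                         -- raise hi over results keys, `return hi + 1`
        | none => 1                                             -- unreachable: cd ≠ ∅ here
  else if rd.size ≠ 0 then
    -- `covered = {g for g, v in results.items() if v}`
    let covered := PySem.Set.ofList ((rd.items.filter (fun p => !(p.2 == []))).map Prod.fst)
    match (PySem.List.pyRange 1 39).find? (fun g => !(covered.contains g)) with
    | some g => g
    | none =>
        match PySem.List.max? rd.keys (fun x => x) with         -- `max(results_by_giornata) + 1`
        | some m => m + 1
        | none => 1                                             -- unreachable: rd ≠ ∅ here
  else 1

-- ===== PRECONDITION & SPEC =====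
def Spec_find_next_giornata (results_by_giornata : List (Int × List Int)) (calendar_by_giornata : List (Int × List Int)) (out : Int) : Prop := out = find_next_giornata_alt results_by_giornata calendar_by_giornata
instance (results_by_giornata : List (Int × List Int)) (calendar_by_giornata : List (Int × List Int)) (out : Int) : Decidable (Spec_find_next_giornata results_by_giornata calendar_by_giornata out) := by unfold Spec_find_next_giornata; infer_instance

-- ===== CLAIM (what is proved, stated in full; the proofs are below) =====
def Claim_equal_find_next_giornata : Prop := ∀ (results_by_giornata : List (Int × List Int)) (calendar_by_giornata : List (Int × List Int)), Dom_find_next_giornata results_by_giornata calendar_by_giornata → Spec_find_next_giornata results_by_giornata calendar_by_giornata (find_next_giornata results_by_giornata calendar_by_giornata)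

-- ===== LEMMAS AND PROOFS =====

-- A's union-scan predicate and B's item predicate
def pvP (rd cd : PySem.Dict Int (List Int)) (g : Int) : Bool :=
  !(cd.getD g [] == []) && decide ((rd.getD g []).length < (cd.getD g []).length)
def pvQ (rd : PySem.Dict Int (List Int)) (p : Int × List Int) : Bool :=
  !(p.2 == []) && decide ((rd.getD p.1 []).length < p.2.length)

-- A's scan loop is `find?` with pvP
theorem pvLoopA_eq_find? (rd cd : PySem.Dict Int (List Int)) (l : List Int) :
    pvLoopA rd cd l = l.find? (pvP rd cd) := by
  induction l with
  | nil => rfl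
  | cons g rest ih =>
      by_cases hc : cd.getD g [] = []
      · simp [pvLoopA, hc, List.find?, pvP, ih]
      · have hce : (cd.getD g []).isEmpty = false := by simp [hc]
        by_cases hlt : (rd.getD g []).length < (cd.getD g []).length
        · simp [pvLoopA, hc, hlt, List.find?, pvP, hce]
        · simp [pvLoopA, hc, hlt, List.find?, pvP, hce, ih]

-- A's 1..38 loop is `find?` with the emptiness predicate
theorem pvLoopRangeA_eq_find? (rd : PySem.Dict Int (List Int)) (l : List Int) :
    pvLoopRangeA rd l = l.find? (fun g => rd.getD g [] == []) := by
  induction l with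
  | nil => rfl
  | cons g rest ih =>
      cases hg : rd.get? g with
      | none => simp [pvLoopRangeA, hg, List.find?, PySem.Dict.getD_of_get?_eq_none rd _ hg]
      | some v =>
          rw [pvLoopRangeA]
          rw [hg]
          by_cases hv : v = []
          · simp [hv, List.find?, PySem.Dict.getD_of_get?_eq_some rd _ hg]
          · have hve : v.isEmpty = false := by simp [hv]
            simp [List.find?, PySem.Dict.getD_of_get?_eq_some rd _ hg, hv, hve,
              List.length_eq_zero_iff, ih]

-- `find?` only depends on the predicate's values on the list
theorem pvFind?_congr (l : List Int) (p q : Int → Bool) (h : ∀ x ∈ l, p x = q x) :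
    l.find? p = l.find? q := by
  induction l with
  | nil => rfl
  | cons a t ih =>
      have ha := h a List.mem_cons_self
      by_cases hp : p a = true
      · simp [List.find?, hp, ha ▸ hp]
      · have hp' : p a = false := by simpa using hp
        have hq' : q a = false := ha ▸ hp'
        simp [List.find?, hp', hq', ih (fun x hx => h x (List.mem_cons_of_mem a hx))]

-- `max?` with identity key is permutation-invariant
theorem pvMax?_eq_of_perm (l₁ l₂ : List Int) (h : l₁.Perm l₂) :
    PySem.List.max? l₁ (fun x => x) = PySem.List.max? l₂ (fun x => x) := by
  cases h₁ : PySem.List.max? l₁ (fun x => x) with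
  | none =>
      rw [PySem.List.max?_eq_none_iff] at h₁
      subst h₁
      rw [List.nil_perm] at h
      subst h
      rfl
  | some m =>
      cases h₂ : PySem.List.max? l₂ (fun x => x) with
      | none =>
          rw [PySem.List.max?_eq_none_iff] at h₂
          subst h₂
          rw [List.perm_nil] at h
          have := PySem.List.max?_mem h₁
          simp [h] at this
      | some m' =>
          have hm := PySem.List.max?_mem h₁
          have hm' := PySem.List.max?_mem h₂
          have h1 := PySem.List.max?_isMax h₁ m' (h.mem_iff.mpr hm')
          have h2 := PySem.List.max?_isMax h₂ m (h.mem_iff.mp hm)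
          simp only [Option.some.injEq]
          omega

-- the first element of a strictly ascending list satisfying p is the minimum of any
-- permutation of its p-filter
theorem pvFind?_sorted_eq_min? (S K : List Int) (p : Int → Bool)
    (hperm : S.Perm K) (hsort : S.Pairwise (· < ·)) :
    S.find? p = PySem.List.min? (K.filter p) (fun x => x) := by
  cases hf : S.find? p with
  | none =>
      rw [← List.head?_filter, List.head?_eq_none_iff] at hf
      have : K.filter p = [] := by
        have := (hperm.filter p).length_eq
        simp [hf] at this
        exact List.eq_nil_of_length_eq_zero this.symm
      rw [this]
      rfl
  | some g =>
      rw [← List.head?_filter] at hf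
      obtain ⟨rest, hrest⟩ : ∃ rest, S.filter p = g :: rest := by
        have hf' := hf
        cases hS : S.filter p with
        | nil => simp [hS] at hf'
        | cons a t =>
            rw [hS] at hf'
            simp at hf'
            exact ⟨t, by simp [hf']⟩
      have hmemS : g ∈ S.filter p := by rw [hrest]; exact List.mem_cons_self
      have hmemK : g ∈ K.filter p := (hperm.filter p).mem_iff.mp hmemS
      have hminS : ∀ y ∈ S.filter p, g ≤ y := by
        intro y hy
        rw [hrest] at hy
        rcases List.mem_cons.mp hy with h | h
        · omega
        · have := hsort.filter p
          rw [hrest] at this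
          have := (List.pairwise_cons.mp this).1 y h
          omega
      have hminK : ∀ y ∈ K.filter p, g ≤ y := fun y hy =>
        hminS y ((hperm.filter p).mem_iff.mpr hy)
      cases hmin : PySem.List.min? (K.filter p) (fun x => x) with
      | none =>
          rw [PySem.List.min?_eq_none_iff] at hmin
          simp [hmin] at hmemK
      | some m =>
          have h1 := PySem.List.min?_isMin hmin g hmemK
          have h2 := hminK m (PySem.List.min?_mem hmin)
          simp only [Option.some.injEq]
          omega

-- `xs[-1]` of a nonempty list is its last element
theorem pvPyGet?_neg_one (l : List Int) (h : l ≠ []) :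
    PySem.List.pyGet? l (-1) = l.getLast? := by
  have hl : 1 ≤ l.length := by
    cases l with
    | nil => simp at h
    | cons a t => simp
  simp [PySem.List.pyGet?, PySem.List.pyIdx?, hl, List.getLast?_eq_getElem?]

-- last of the ascending sort of a list = its max
theorem pvLast_sorted_eq_max? (l : List Int) (h : l ≠ []) :
    (PySem.List.sorted l (fun x => x)).getLast? = PySem.List.max? l (fun x => x) := by
  set S := PySem.List.sorted l (fun x => x) with hS
  have hperm : S.Perm l := PySem.List.sorted_perm l (fun x => x) false
  have hSne : S ≠ [] := by
    intro hnil
    exact h (List.nil_perm.mp (hnil ▸ hperm))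
  obtain ⟨m, hm⟩ := List.getLast?_isSome.mpr hSne |> Option.isSome_iff_exists.mp
  have hmem : m ∈ S := List.mem_of_getLast? hm
  have hmax : ∀ y ∈ S, y ≤ m := by
    intro y hy
    have hpw : S.Pairwise (· ≤ ·) := PySem.List.sorted_pairwise l (fun x => x)
    obtain ⟨init, hinit⟩ := List.getLast?_eq_some_iff.mp hm
    rw [hinit] at hy hpw
    rcases (List.mem_append.mp hy) with h | h
    · exact (List.pairwise_append.mp hpw).2.2 y h m List.mem_cons_self
    · simp at h; omega
  cases hmax' : PySem.List.max? l (fun x => x) with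
  | none =>
      rw [PySem.List.max?_eq_none_iff] at hmax'
      exact absurd hmax' h
  | some m' =>
      rw [hm]
      have h1 := PySem.List.max?_isMax hmax' m (hperm.mem_iff.mp hmem)
      have h2 := hmax m' (hperm.mem_iff.mpr (PySem.List.max?_mem hmax'))
      simp only [Option.some.injEq]
      omega

-- keys of a dict are empty iff its size is 0
theorem pvKeys_ne_nil (d : PySem.Dict Int (List Int)) (h : d.size ≠ 0) : d.keys ≠ [] := by
  intro hk
  apply h
  have : d.items.length = 0 := by
    have := congrArg List.length hk
    simpa [PySem.Dict.keys] using this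
  simpa [PySem.Dict.size] using this

-- membership bridge: the keys of the pvQ-filtered calendar items are exactly the
-- pvP-satisfying elements of the key union
theorem pvMem_keysList_iff (rd cd : PySem.Dict Int (List Int)) (hnd : cd.keys.Nodup) (g : Int) :
    g ∈ (cd.items.filter (pvQ rd)).map Prod.fst ↔
      (g ∈ PySem.Set.ofList (rd.keys ++ cd.keys) ∧ pvP rd cd g = true) := by
  constructor
  · intro hg
    obtain ⟨pr, hmem, hfst⟩ := List.mem_map.mp hg
    obtain ⟨hitems, hq⟩ := List.mem_filter.mp hmem
    have hgd : cd.getD pr.1 [] = pr.2 := PySem.Dict.getD_of_mem_items cd (by simpa using hitems) hnd []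
    have hp : pvP rd cd pr.1 = true := by
      simp only [pvP, hgd]
      simpa [pvQ] using hq
    refine ⟨?_, hfst ▸ hp⟩
    rw [PySem.Set.mem_ofList]
    exact List.mem_append.mpr (Or.inr (hfst ▸ PySem.Dict.mem_keys_of_mem_items cd hitems))
  · rintro ⟨_, hp⟩
    have hne : ¬ cd.getD g [] = [] := by
      intro h0
      simp [pvP, h0] at hp
    cases hget : cd.get? g with
    | none => exact absurd (PySem.Dict.getD_of_get?_eq_none cd _ hget) hne
    | some v =>
        have hgd : cd.getD g [] = v := PySem.Dict.getD_of_get?_eq_some cd _ hget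
        have hitems : (g, v) ∈ cd.items := PySem.Dict.mem_items_of_get?_eq_some cd hget
        refine List.mem_map.mpr ⟨(g, v), List.mem_filter.mpr ⟨hitems, ?_⟩, rfl⟩
        simpa [pvQ, pvP, hgd] using hp

-- B's running-min loop is a min-fold over the keys of the pvQ-filtered items
theorem pvBestB_eq_fold (rd : PySem.Dict Int (List Int)) (items : List (Int × List Int))
    (best : Option Int) :
    pvBestB rd items best =
      ((items.filter (pvQ rd)).map Prod.fst).foldl
        (fun acc g => some (acc.elim g (fun b => if g < b then g else b))) best := by
  induction items generalizing best with
  | nil => rfl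
  | cons p rest ih =>
      obtain ⟨g, m⟩ := p
      by_cases hq : m ≠ [] ∧ (rd.getD g []).length < m.length
      · have hq' : pvQ rd (g, m) = true := by
          simp [pvQ]
          exact ⟨hq.1, hq.2⟩
        cases best with
        | none => simp [pvBestB, hq, hq', ih]
        | some b =>
            by_cases hlt : g < b
            · simp [pvBestB, hq, hq', hlt, ih]
            · simp [pvBestB, hq, hq', hlt, ih]
      · have hq' : pvQ rd (g, m) = false := by
          simp [pvQ]
          intro h1
          rcases Decidable.not_and_iff_or_not.mp hq with h | h
          · simp at h; exact absurd h (by simpa using h1)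
          · omega
        simp [pvBestB, hq, hq', ih]

-- the min-fold returns none iff it never saw anything
theorem pvFoldMin_none (l : List Int) (acc : Option Int) :
    l.foldl (fun acc g => some (acc.elim g (fun b => if g < b then g else b))) acc = none ↔
      acc = none ∧ l = [] := by
  induction l generalizing acc with
  | nil => simp [List.foldl]
  | cons g t ih => simp [List.foldl, ih]

-- the min-fold's result is a member bounded below everything it saw
theorem pvFoldMin_some (l : List Int) (acc : Option Int) (m : Int)
    (h : l.foldl (fun acc g => some (acc.elim g (fun b => if g < b then g else b))) acc = some m) :
    (acc = some m ∨ m ∈ l) ∧ (∀ b, acc = some b → m ≤ b) ∧ ∀ y ∈ l, m ≤ y := by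
  induction l generalizing acc with
  | nil =>
      refine ⟨Or.inl h, fun b hb => ?_, by simp⟩
      simp only [List.foldl] at h
      rw [h] at hb
      injection hb with hb'
      omega
  | cons g t ih =>
      rw [List.foldl] at h
      obtain ⟨hmem, hacc, hall⟩ := ih _ h
      have hv : m ≤ (acc.elim g (fun b => if g < b then g else b)) := hacc _ rfl
      cases acc with
      | none =>
          simp at hv
          refine ⟨?_, by simp, ?_⟩
          · rcases hmem with h' | h'
            · simp at h'
              exact Or.inr (by simp [h'])
            · exact Or.inr (List.mem_cons_of_mem g h')
          · intro y hy
            rcases List.mem_cons.mp hy with h' | h'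
            · omega
            · exact hall y h'
      | some b =>
          simp at hv
          have hvb : (if g < b then g else b) ≤ b := by split <;> omega
          have hvg : (if g < b then g else b) ≤ g := by split <;> omega
          refine ⟨?_, fun b' hb' => ?_, ?_⟩
          · rcases hmem with h' | h'
            · simp at h'
              by_cases hlt : g < b
              · rw [if_pos hlt] at h'; exact Or.inr (by simp [h'])
              · rw [if_neg hlt] at h'; exact Or.inl (by simp [h'])
            · exact Or.inr (List.mem_cons_of_mem g h')
          · have : b' = b := by injection hb' with hbb; omega
            omega
          · intro y hy
            rcases List.mem_cons.mp hy with h' | h'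
            · omega
            · exact hall y h'

-- B's hi-raising loop: characterisation
theorem pvHiB_spec (l : List Int) (h0 : Int) :
    (pvHiB l h0 = h0 ∨ pvHiB l h0 ∈ l) ∧ h0 ≤ pvHiB l h0 ∧ ∀ y ∈ l, y ≤ pvHiB l h0 := by
  induction l generalizing h0 with
  | nil => simp [pvHiB]
  | cons g t ih =>
      rw [pvHiB]
      by_cases hg : g > h0
      · rw [if_pos hg]
        obtain ⟨hmem, hle, hall⟩ := ih g
        refine ⟨?_, by omega, ?_⟩
        · rcases hmem with h' | h'
          · exact Or.inr (by simp [h'])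
          · exact Or.inr (List.mem_cons_of_mem g h')
        · intro y hy
          rcases List.mem_cons.mp hy with h' | h'
          · omega
          · exact hall y h'
      · rw [if_neg hg]
        obtain ⟨hmem, hle, hall⟩ := ih h0
        refine ⟨?_, hle, ?_⟩
        · rcases hmem with h' | h'
          · exact Or.inl h'
          · exact Or.inr (List.mem_cons_of_mem g h')
        · intro y hy
          rcases List.mem_cons.mp hy with h' | h'
          · omega
          · exact hall y h'

-- covered-set membership is exactly `results.getD g [] ≠ []`
theorem pvMem_covered_iff (rd : PySem.Dict Int (List Int)) (hnd : rd.keys.Nodup) (g : Int) :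
    g ∈ PySem.Set.ofList ((rd.items.filter (fun p => !(p.2 == []))).map Prod.fst) ↔
      ¬ rd.getD g [] = [] := by
  rw [PySem.Set.mem_ofList]
  constructor
  · intro hg
    obtain ⟨pr, hmem, hfst⟩ := List.mem_map.mp hg
    obtain ⟨hitems, hv⟩ := List.mem_filter.mp hmem
    have hgd : rd.getD pr.1 [] = pr.2 := PySem.Dict.getD_of_mem_items rd (by simpa using hitems) hnd []
    have : ¬ rd.getD pr.1 [] = [] := by
      rw [hgd]
      simpa using hv
    exact hfst ▸ this
  · intro hne
    cases hget : rd.get? g with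
    | none => exact absurd (PySem.Dict.getD_of_get?_eq_none rd _ hget) hne
    | some v =>
        have hgd : rd.getD g [] = v := PySem.Dict.getD_of_get?_eq_some rd _ hget
        have hitems : (g, v) ∈ rd.items := PySem.Dict.mem_items_of_get?_eq_some rd hget
        exact List.mem_map.mpr ⟨(g, v), List.mem_filter.mpr ⟨hitems, by simp [← hgd, hne]⟩, rfl⟩

-- the two fallback branches agree
theorem pvFallback_eq (rd : PySem.Dict Int (List Int)) (hnd : rd.keys.Nodup) :
    pvFallbackA rd =
      (if rd.size ≠ 0 then
        match (PySem.List.pyRange 1 39).find?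
            (fun g => !((PySem.Set.ofList ((rd.items.filter (fun p => !(p.2 == []))).map Prod.fst)).contains g)) with
        | some g => g
        | none =>
            match PySem.List.max? rd.keys (fun x => x) with
            | some m => m + 1
            | none => 1
      else 1) := by
  by_cases hsz : rd.size = 0
  · simp [pvFallbackA, hsz]
  · have hk : rd.keys ≠ [] := pvKeys_ne_nil rd hsz
    have h39 : (38 : Int) + 1 = 39 := by norm_num
    rw [pvFallbackA]
    simp only [hsz, if_true, ne_eq, not_false_eq_true, h39]
    rw [pvLoopRangeA_eq_find?]
    rw [pvFind?_congr (PySem.List.pyRange 1 39)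
      (fun g => rd.getD g [] == [])
      (fun g => !((PySem.Set.ofList ((rd.items.filter (fun p => !(p.2 == []))).map Prod.fst)).contains g))
      (fun g _ => by
      by_cases hg : rd.getD g [] = []
      · have h1 : ¬ g ∈ PySem.Set.ofList ((rd.items.filter (fun p => !(p.2 == []))).map Prod.fst) :=
          fun hmem => (pvMem_covered_iff rd hnd g).mp hmem hg
        have h2 : ((PySem.Set.ofList ((rd.items.filter (fun p => !(p.2 == []))).map Prod.fst)).contains g) = false := by
          simpa using h1
        simp only [h2, hg]
        rfl
      · have h1 := (pvMem_covered_iff rd hnd g).mpr hg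
        have h2 : ((PySem.Set.ofList ((rd.items.filter (fun p => !(p.2 == []))).map Prod.fst)).contains g) = true := by
          simpa using h1
        have h3 : (rd.getD g [] == []) = false := by simpa using hg
        simp only [h2, h3]
        rfl)]
    cases hfind : (PySem.List.pyRange 1 39).find? _ with
    | some g => simp
    | none =>
        have hSne : PySem.List.sorted rd.keys (fun x => x) ≠ [] := by
          rw [ne_eq, PySem.List.sorted_eq_nil_iff]
          exact hk
        rw [pvPyGet?_neg_one _ hSne, pvLast_sorted_eq_max? _ hk]

-- ===== VERDICT (by name: the statement is the Claim_ definition above) =====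
theorem find_next_giornata_spec : Claim_equal_find_next_giornata := by
  intro results calendar _
  unfold Spec_find_next_giornata find_next_giornata find_next_giornata_alt
  set rd := PySem.Dict.ofList results with hrd
  set cd := PySem.Dict.ofList calendar with hcd
  have hndr : rd.keys.Nodup := by
    rw [hrd]; exact PySem.Dict.nodup_keys_ofList results
  by_cases hc : cd.size = 0
  · simp only [hc, ne_eq, not_true_eq_false, if_false]
    rw [pvFallback_eq rd hndr]
  · simp only [hc, ne_eq, not_false_eq_true, if_true]
    have hndc : cd.keys.Nodup := by
      rw [hcd]; exact PySem.Dict.nodup_keys_ofList calendar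
    set K := PySem.Set.ofList (rd.keys ++ cd.keys) with hK
    set S := PySem.List.sorted K (fun x => x) with hS
    have hperm : S.Perm K := PySem.List.sorted_perm K (fun x => x) false
    have hsort : S.Pairwise (· < ·) := PySem.List.sorted_ofList_pairwise_lt (rd.keys ++ cd.keys)
    have hKne : K ≠ [] := by
      intro hnil
      have hck : cd.keys ≠ [] := pvKeys_ne_nil cd hc
      cases hkk : cd.keys with
      | nil => exact hck hkk
      | cons a t =>
          have ha : a ∈ K := (PySem.Set.mem_ofList _ a).mpr (by simp [hkk])
          simp [hnil] at ha
    rw [pvLoopA_eq_find?, pvFind?_sorted_eq_min? S K _ hperm hsort,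
      pvBestB_eq_fold]
    -- both sides pick the minimum over the same set of giornate
    have hmemEq : ∀ g, g ∈ (cd.items.filter (pvQ rd)).map Prod.fst ↔ g ∈ K.filter (pvP rd cd) := by
      intro g
      rw [pvMem_keysList_iff rd cd hndc g, List.mem_filter]
    cases hmin : PySem.List.min? (K.filter (pvP rd cd)) (fun x => x) with
    | none =>
        rw [PySem.List.min?_eq_none_iff] at hmin
        have hBnone : ((cd.items.filter (pvQ rd)).map Prod.fst).foldl
            (fun acc g => some (acc.elim g (fun b => if g < b then g else b))) none = none := by
          rw [pvFoldMin_none]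
          refine ⟨rfl, List.eq_nil_iff_forall_not_mem.mpr ?_⟩
          intro g hg
          have := (hmemEq g).mp hg
          simp [hmin] at this
        rw [hBnone]
        -- max(all_giornate)+1 vs the hi-raising loop
        rw [pvMax?_eq_of_perm S K hperm]
        cases hmax : PySem.List.max? K (fun x => x) with
        | none => rw [PySem.List.max?_eq_none_iff] at hmax; exact absurd hmax hKne
        | some M =>
            cases hmaxc : PySem.List.max? cd.keys (fun x => x) with
            | none =>
                rw [PySem.List.max?_eq_none_iff] at hmaxc
                exact absurd hmaxc (pvKeys_ne_nil cd hc)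
            | some h =>
                have hMmem := PySem.List.max?_mem hmax
                have hMmax := fun y hy => PySem.List.max?_isMax hmax y hy
                have hhmem := PySem.List.max?_mem hmaxc
                have hhmax := fun y hy => PySem.List.max?_isMax hmaxc y hy
                obtain ⟨hrmem, hrle, hrall⟩ := pvHiB_spec rd.keys h
                set r := pvHiB rd.keys h with hr
                have hrK : r ∈ K := by
                  rcases hrmem with h' | h'
                  · rw [h', PySem.Set.mem_ofList]; exact List.mem_append.mpr (Or.inr hhmem)
                  · rw [PySem.Set.mem_ofList]; exact List.mem_append.mpr (Or.inl h')
                have hMK := (PySem.Set.mem_ofList _ M).mp (hK ▸ hMmem)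
                have hMr : M ≤ r := by
                  rcases List.mem_append.mp hMK with h' | h'
                  · exact hrall M h'
                  · have := hhmax M h'; omega
                have hrM : r ≤ M := hMmax r hrK
                simp only []
                omega
    | some m =>
        have hmmem := PySem.List.min?_mem hmin
        have hmmin := fun y hy => PySem.List.min?_isMin hmin y hy
        cases hB : ((cd.items.filter (pvQ rd)).map Prod.fst).foldl
            (fun acc g => some (acc.elim g (fun b => if g < b then g else b))) none with
        | none =>
            rw [pvFoldMin_none] at hB
            have := (hmemEq m).mpr hmmem
            simp [hB.2] at this
        | some b =>
            obtain ⟨hbmem, _, hball⟩ := pvFoldMin_some _ _ _ hB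
            rcases hbmem with h' | h'
            · simp at h'
            · have hbK := (hmemEq b).mp h'
              have h1 := hmmin b hbK
              have h2 := hball m ((hmemEq m).mpr hmmem)
              simp only [Option.some.injEq]
              omega
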